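-- pv_equiv track=rewrite | github.com/KailasVS666/boltdev-beachhack | csv_output/explainability.py | _map_sensors_to_actions
-- ===== SOURCE A (Python) =====
-- from typing import List, Tuple, Dict, Optional
--
-- def _map_sensors_to_actions(top_features: List[Dict]) -> str:
--     """
--     Map sensor anomalies to specific maintenance actions
--
--     Args:
--         top_features: List of top contributing sensors
--
--     Returns:
--         Recommended inspection/maintenance action
--     """
--     actions = []
--
--     for feature in top_features[:3]:  # Top 3 sensors
--         sensor = feature['name']
--
--         # Temperature sensors
--         if 'T50' in sensor or 'LPT' in sensor:
--             actions.append("Borescope inspection of LPT (Low-Pressure Turbine) blades")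
--         elif 'T30' in sensor or 'HPC' in sensor:
--             actions.append("Inspect HPC (High-Pressure Compressor) for fouling or damage")
--         elif 'T24' in sensor or 'LPC' in sensor:
--             actions.append("Check LPC (Low-Pressure Compressor) efficiency")
--         elif 'T2' in sensor:
--             actions.append("Verify inlet temperature sensors and environmental controls")
--
--         # Pressure sensors
--         elif 'P30' in sensor:
--             actions.append("Pressure test HPC outlet, check for leaks")
--         elif 'P15' in sensor or 'bypass' in sensor.lower():
--             actions.append("Inspect bypass duct for blockages or damage")
--         elif 'P2' in sensor:
--             actions.append("Check inlet pressure sensors and air filtration")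
--
--         # Speed sensors
--         elif 'Nc' in sensor or 'core' in sensor.lower():
--             actions.append("Inspect core rotor bearings and balance")
--         elif 'Nf' in sensor or 'fan' in sensor.lower():
--             actions.append("Inspect fan blades and bearings")
--
--         # Derived metrics
--         elif 'epr' in sensor.lower():
--             actions.append("Full engine pressure ratio check across all stages")
--         elif 'phi' in sensor or 'fuel' in sensor.lower():
--             actions.append("Inspect fuel nozzles and flow control systems")
--
--     if not actions:
--         actions = ["Comprehensive engine diagnostic inspection per maintenance manual"]
--
--     # Remove duplicates and join
--     unique_actions = list(dict.fromkeys(actions))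
--     return " | ".join(unique_actions)
-- ===== SOURCE B (Python) =====
-- # B: exhaustive flat pattern table + argmin rule selection + inline dedup,
-- # instead of A's ordered if/elif first-match chain with post-hoc dict.fromkeys.
-- # Each pattern carries its rule index; per sensor we collect ALL matching
-- # patterns and pick the minimal rule index, which equals A's first-firing
-- # branch because indices follow the chain's order.
-- _PATTERNS = [
--     ("T50", False, 0), ("LPT", False, 0),
--     ("T30", False, 1), ("HPC", False, 1),
--     ("T24", False, 2), ("LPC", False, 2),
--     ("T2", False, 3),
--     ("P30", False, 4),
--     ("P15", False, 5), ("bypass", True, 5),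
--     ("P2", False, 6),
--     ("Nc", False, 7), ("core", True, 7),
--     ("Nf", False, 8), ("fan", True, 8),
--     ("epr", True, 9),
--     ("phi", False, 10), ("fuel", True, 10),
-- ]
--
-- _ACTIONS = [
--     "Borescope inspection of LPT (Low-Pressure Turbine) blades",
--     "Inspect HPC (High-Pressure Compressor) for fouling or damage",
--     "Check LPC (Low-Pressure Compressor) efficiency",
--     "Verify inlet temperature sensors and environmental controls",
--     "Pressure test HPC outlet, check for leaks",
--     "Inspect bypass duct for blockages or damage",
--     "Check inlet pressure sensors and air filtration",
--     "Inspect core rotor bearings and balance",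
--     "Inspect fan blades and bearings",
--     "Full engine pressure ratio check across all stages",
--     "Inspect fuel nozzles and flow control systems",
-- ]
--
-- def _map_sensors_to_actions(top_features):
--     picked = []
--     for feature in top_features[:3]:
--         s = feature['name']
--         sl = s.lower()
--         hits = [i for p, low, i in _PATTERNS if p in (sl if low else s)]
--         if hits:
--             a = _ACTIONS[min(hits)]
--             if a not in picked:
--                 picked.append(a)
--     if not picked:
--         return "Comprehensive engine diagnostic inspection per maintenance manual"
--     return " | ".join(picked)
-- ===== Notes on version B (the rewrite author's own statement) =====
-- stated objective: alternative
-- what changed: Replaces the ordered if/elif first-match chain (plus post-hoc dict.fromkeys dedup) by an exhaustive scan of a flat pattern table that collects ALL matching rule indices per sensor and selects the action by argmin of the index, deduplicating inline while appending.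
import Mathlib
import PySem

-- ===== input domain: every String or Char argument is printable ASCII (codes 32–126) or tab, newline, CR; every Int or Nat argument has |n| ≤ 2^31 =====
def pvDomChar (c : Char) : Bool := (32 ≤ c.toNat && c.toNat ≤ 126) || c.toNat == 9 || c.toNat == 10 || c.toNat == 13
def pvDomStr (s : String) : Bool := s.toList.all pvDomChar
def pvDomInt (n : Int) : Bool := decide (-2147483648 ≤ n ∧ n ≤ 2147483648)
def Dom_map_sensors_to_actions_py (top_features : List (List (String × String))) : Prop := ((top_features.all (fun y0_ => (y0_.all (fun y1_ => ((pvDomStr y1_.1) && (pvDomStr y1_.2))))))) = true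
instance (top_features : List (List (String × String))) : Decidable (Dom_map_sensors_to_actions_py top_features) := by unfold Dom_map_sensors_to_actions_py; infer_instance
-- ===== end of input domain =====

-- B replaces A's ordered if/elif chain + post-hoc dedup by an exhaustive flat pattern
-- table with argmin rule-index selection and inline dedup (objective: alternative).

-- ===== PORT A =====
-- one loop body of A: the if/elif chain appending at most one action
def pvAStep (acc : List String) (feature : List (String × String)) : List String :=
  let sensor := (PySem.Dict.mk feature).getD "name" ""   -- KeyError (missing 'name') excluded by Pre_
  if PySem.Str.isIn "T50" sensor || PySem.Str.isIn "LPT" sensor then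
    acc ++ ["Borescope inspection of LPT (Low-Pressure Turbine) blades"]
  else if PySem.Str.isIn "T30" sensor || PySem.Str.isIn "HPC" sensor then
    acc ++ ["Inspect HPC (High-Pressure Compressor) for fouling or damage"]
  else if PySem.Str.isIn "T24" sensor || PySem.Str.isIn "LPC" sensor then
    acc ++ ["Check LPC (Low-Pressure Compressor) efficiency"]
  else if PySem.Str.isIn "T2" sensor then
    acc ++ ["Verify inlet temperature sensors and environmental controls"]
  else if PySem.Str.isIn "P30" sensor then
    acc ++ ["Pressure test HPC outlet, check for leaks"]
  else if PySem.Str.isIn "P15" sensor || PySem.Str.isIn "bypass" (PySem.Str.lower sensor) then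
    acc ++ ["Inspect bypass duct for blockages or damage"]
  else if PySem.Str.isIn "P2" sensor then
    acc ++ ["Check inlet pressure sensors and air filtration"]
  else if PySem.Str.isIn "Nc" sensor || PySem.Str.isIn "core" (PySem.Str.lower sensor) then
    acc ++ ["Inspect core rotor bearings and balance"]
  else if PySem.Str.isIn "Nf" sensor || PySem.Str.isIn "fan" (PySem.Str.lower sensor) then
    acc ++ ["Inspect fan blades and bearings"]
  else if PySem.Str.isIn "epr" (PySem.Str.lower sensor) then
    acc ++ ["Full engine pressure ratio check across all stages"]
  else if PySem.Str.isIn "phi" sensor || PySem.Str.isIn "fuel" (PySem.Str.lower sensor) then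
    acc ++ ["Inspect fuel nozzles and flow control systems"]
  else acc

def map_sensors_to_actions_py (top_features : List (List (String × String))) : String :=
  let actions := (PySem.List.slice top_features none (some 3)).foldl pvAStep []
  let actions := if actions = [] then ["Comprehensive engine diagnostic inspection per maintenance manual"] else actions
  PySem.Str.join " | " (PySem.List.dedup actions)

-- ===== PORT B =====
-- flat pattern table: (substring, search-in-lowercased?, rule index)
def pvPatterns : List (String × Bool × Nat) :=
  [ ("T50", false, 0), ("LPT", false, 0),
    ("T30", false, 1), ("HPC", false, 1),
    ("T24", false, 2), ("LPC", false, 2),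
    ("T2", false, 3),
    ("P30", false, 4),
    ("P15", false, 5), ("bypass", true, 5),
    ("P2", false, 6),
    ("Nc", false, 7), ("core", true, 7),
    ("Nf", false, 8), ("fan", true, 8),
    ("epr", true, 9),
    ("phi", false, 10), ("fuel", true, 10) ]

def pvActions : List String :=
  [ "Borescope inspection of LPT (Low-Pressure Turbine) blades",
    "Inspect HPC (High-Pressure Compressor) for fouling or damage",
    "Check LPC (Low-Pressure Compressor) efficiency",
    "Verify inlet temperature sensors and environmental controls",
    "Pressure test HPC outlet, check for leaks",
    "Inspect bypass duct for blockages or damage",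
    "Check inlet pressure sensors and air filtration",
    "Inspect core rotor bearings and balance",
    "Inspect fan blades and bearings",
    "Full engine pressure ratio check across all stages",
    "Inspect fuel nozzles and flow control systems" ]

-- one loop body of B: collect all matching rule indices, pick the minimum, dedup inline
def pvBStep (picked : List String) (feature : List (String × String)) : List String :=
  let s := (PySem.Dict.mk feature).getD "name" ""   -- KeyError excluded by Pre_
  let sl := PySem.Str.lower s
  let hits := (pvPatterns.filter
    (fun t => PySem.Str.isIn t.1 (if t.2.1 then sl else s))).map (fun t => t.2.2)
  match PySem.List.min? hits (fun x => x) with      -- 'if hits: i = min(hits)'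
  | none => picked
  | some i =>
      let a := pvActions.getD i ""                  -- _ACTIONS[i]; every table index is < 11
      if a ∈ picked then picked else picked ++ [a]

def map_sensors_to_actions_py_alt (top_features : List (List (String × String))) : String :=
  let picked := (PySem.List.slice top_features none (some 3)).foldl pvBStep []
  if picked = [] then "Comprehensive engine diagnostic inspection per maintenance manual"
  else PySem.Str.join " | " picked

-- ===== PRECONDITION & SPEC =====
-- Pre_ excludes features among the first three without a 'name' key: there Python A raises KeyError.
def Pre_map_sensors_to_actions_py (top_features : List (List (String × String))) : Prop :=
  ∀ f ∈ PySem.List.slice top_features none (some 3), "name" ∈ f.map Prod.fst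
instance (top_features : List (List (String × String))) : Decidable (Pre_map_sensors_to_actions_py top_features) := by unfold Pre_map_sensors_to_actions_py; infer_instance

def pvWitness_map_sensors_to_actions_py : (List (List (String × String))) := [[("name", "T50 sensor")], [("name", "fan speed")]]

def Spec_map_sensors_to_actions_py (top_features : List (List (String × String))) (out : String) : Prop := out = map_sensors_to_actions_py_alt top_features
instance (top_features : List (List (String × String))) (out : String) : Decidable (Spec_map_sensors_to_actions_py top_features out) := by unfold Spec_map_sensors_to_actions_py; infer_instance

-- ===== CLAIM =====
def Claim_equal_map_sensors_to_actions_py : Prop := ∀ (top_features : List (List (String × String))), Dom_map_sensors_to_actions_py top_features → Pre_map_sensors_to_actions_py top_features → Spec_map_sensors_to_actions_py top_features (map_sensors_to_actions_py top_features)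

-- ===== LEMMAS AND PROOFS =====

-- A's chain as an option-valued choice (proof-side view of both loop bodies)
def pvOpt (sensor : String) : Option String :=
  if PySem.Str.isIn "T50" sensor || PySem.Str.isIn "LPT" sensor then
    some "Borescope inspection of LPT (Low-Pressure Turbine) blades"
  else if PySem.Str.isIn "T30" sensor || PySem.Str.isIn "HPC" sensor then
    some "Inspect HPC (High-Pressure Compressor) for fouling or damage"
  else if PySem.Str.isIn "T24" sensor || PySem.Str.isIn "LPC" sensor then
    some "Check LPC (Low-Pressure Compressor) efficiency"
  else if PySem.Str.isIn "T2" sensor then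
    some "Verify inlet temperature sensors and environmental controls"
  else if PySem.Str.isIn "P30" sensor then
    some "Pressure test HPC outlet, check for leaks"
  else if PySem.Str.isIn "P15" sensor || PySem.Str.isIn "bypass" (PySem.Str.lower sensor) then
    some "Inspect bypass duct for blockages or damage"
  else if PySem.Str.isIn "P2" sensor then
    some "Check inlet pressure sensors and air filtration"
  else if PySem.Str.isIn "Nc" sensor || PySem.Str.isIn "core" (PySem.Str.lower sensor) then
    some "Inspect core rotor bearings and balance"
  else if PySem.Str.isIn "Nf" sensor || PySem.Str.isIn "fan" (PySem.Str.lower sensor) then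
    some "Inspect fan blades and bearings"
  else if PySem.Str.isIn "epr" (PySem.Str.lower sensor) then
    some "Full engine pressure ratio check across all stages"
  else if PySem.Str.isIn "phi" sensor || PySem.Str.isIn "fuel" (PySem.Str.lower sensor) then
    some "Inspect fuel nozzles and flow control systems"
  else none

-- B's conditional append, as a function of the chosen option
def pvAdd (acc : List String) : Option String → List String
  | none => acc
  | some a => if a ∈ acc then acc else acc ++ [a]

-- grouped view of the flat pattern table
def pvGroups : List (List (String × Bool)) :=
  [ [("T50", false), ("LPT", false)],
    [("T30", false), ("HPC", false)],
    [("T24", false), ("LPC", false)],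
    [("T2", false)],
    [("P30", false)],
    [("P15", false), ("bypass", true)],
    [("P2", false)],
    [("Nc", false), ("core", true)],
    [("Nf", false), ("fan", true)],
    [("epr", true)],
    [("phi", false), ("fuel", true)] ]

def pvFlat (k : Nat) : List (List (String × Bool)) → List (String × Bool × Nat)
  | [] => []
  | g :: gs => g.map (fun p => (p.1, p.2, k)) ++ pvFlat (k + 1) gs

def pvRuleFind (m : String × Bool → Bool) (k : Nat) : List (List (String × Bool)) → Option Nat
  | [] => none
  | g :: gs => if g.any m then some k else pvRuleFind m (k + 1) gs

lemma pvFlat_ge (k : Nat) (gs : List (List (String × Bool))) :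
    ∀ t ∈ pvFlat k gs, k ≤ t.2.2 := by
  induction gs generalizing k with
  | nil => simp [pvFlat]
  | cons g gs ih =>
    intro t ht
    simp only [pvFlat, List.mem_append, List.mem_map] at ht
    rcases ht with ⟨p, _, rfl⟩ | h
    · exact le_refl k
    · exact le_trans (Nat.le_succ k) (ih (k + 1) t h)

lemma pvFlat_head (m : String × Bool → Bool) (k : Nat) (g : List (String × Bool)) :
    ((g.map (fun p => (p.1, p.2, k))).filter (fun t => m (t.1, t.2.1))).map
        (fun t : String × Bool × Nat => t.2.2) = (g.filter m).map (fun _ => k) := by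
  induction g with
  | nil => rfl
  | cons p ps ih =>
    by_cases hp : m p
    · simp only [List.map_cons, List.filter_cons, Prod.mk.eta, hp, if_pos, List.map_cons, ih]
    · simp only [List.map_cons, List.filter_cons, Prod.mk.eta, hp, Bool.false_eq_true, if_false, ih]

lemma pvMin_flat (m : String × Bool → Bool) (gs : List (List (String × Bool))) (k : Nat) :
    PySem.List.min? (((pvFlat k gs).filter (fun t => m (t.1, t.2.1))).map (fun t => t.2.2)) (fun x => x)
      = pvRuleFind m k gs := by
  induction gs generalizing k with
  | nil => simp [pvFlat, pvRuleFind, PySem.List.min?]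
  | cons g gs ih =>
    by_cases hg : g.any m
    · -- head group matches: the minimum is k
      obtain ⟨p, hp, hpm⟩ := List.any_eq_true.mp hg
      have hne : g.filter m ≠ [] := by
        intro h
        have := List.mem_filter.mpr ⟨hp, hpm⟩
        rw [h] at this; exact absurd this (List.not_mem_nil)
      obtain ⟨x, xs, hx⟩ := List.exists_cons_of_ne_nil hne
      simp only [pvFlat, pvRuleFind, hg, if_pos, List.filter_append, List.map_append,
        pvFlat_head, hx, List.map_cons]
      rw [List.cons_append, PySem.List.min?_id_cons]
      congr 1
      set rest := (xs.map (fun _ => k)) ++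
        ((pvFlat (k + 1) gs).filter (fun t => m (t.1, t.2.1))).map (fun t : String × Bool × Nat => t.2.2) with hrest
      have hge : ∀ y ∈ rest, k ≤ y := by
        intro y hy
        rcases List.mem_append.mp hy with h | h
        · simp at h; omega
        · simp only [List.mem_map] at h
          obtain ⟨t, ht, rfl⟩ := h
          have := pvFlat_ge (k + 1) gs t (List.mem_of_mem_filter ht)
          omega
      have hle := (PySem.List.foldl_min_le rest k).1
      rcases PySem.List.foldl_min_mem rest k with h | h
      · exact h
      · exact le_antisymm hle (hge _ h)
    · -- head group has no match
      have hnil : g.filter m = [] := by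
        rw [List.filter_eq_nil_iff]
        intro p hp
        by_contra hc
        exact hg (List.any_eq_true.mpr ⟨p, hp, by simpa using hc⟩)
      simp only [pvFlat, pvRuleFind, hg, Bool.false_eq_true, if_false,
        List.filter_append, List.map_append, pvFlat_head, hnil, List.map_nil, List.nil_append]
      exact ih (k + 1)

lemma pvPatterns_eq_flat : pvPatterns = pvFlat 0 pvGroups := rfl

-- distribute Option.map over the if-chain produced by unfolding pvRuleFind
lemma pvMap_ite (c : Prop) [Decidable c] (i : Nat) (o : Option Nat) :
    (if c then some i else o).map (fun j => pvActions.getD j "") =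
      if c then some (pvActions.getD i "") else o.map (fun j => pvActions.getD j "") := by
  split <;> rfl

-- the argmin over the flat table, mapped through the action list, is exactly A's chain
lemma pvRuleFind_chain (s : String) :
    (pvRuleFind (fun p => PySem.Str.isIn p.1 (if p.2 then PySem.Str.lower s else s)) 0 pvGroups).map
      (fun i => pvActions.getD i "") = pvOpt s := by
  simp only [pvGroups, pvRuleFind, List.any_cons, List.any_nil,
    Bool.or_false, Bool.false_eq_true, if_false, if_true]
  simp only [pvMap_ite, Option.map_none]
  simp only [show pvActions.getD 0 "" = "Borescope inspection of LPT (Low-Pressure Turbine) blades" from rfl,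
    show pvActions.getD 1 "" = "Inspect HPC (High-Pressure Compressor) for fouling or damage" from rfl,
    show pvActions.getD 2 "" = "Check LPC (Low-Pressure Compressor) efficiency" from rfl,
    show pvActions.getD 3 "" = "Verify inlet temperature sensors and environmental controls" from rfl,
    show pvActions.getD 4 "" = "Pressure test HPC outlet, check for leaks" from rfl,
    show pvActions.getD 5 "" = "Inspect bypass duct for blockages or damage" from rfl,
    show pvActions.getD 6 "" = "Check inlet pressure sensors and air filtration" from rfl,
    show pvActions.getD 7 "" = "Inspect core rotor bearings and balance" from rfl,
    show pvActions.getD 8 "" = "Inspect fan blades and bearings" from rfl,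
    show pvActions.getD 9 "" = "Full engine pressure ratio check across all stages" from rfl,
    show pvActions.getD 10 "" = "Inspect fuel nozzles and flow control systems" from rfl, pvOpt]

lemma pvBStep_opt (acc : List String) (f : List (String × String)) :
    pvBStep acc f = pvAdd acc (pvOpt ((PySem.Dict.mk f).getD "name" "")) := by
  simp only [pvBStep]
  rw [show ((pvPatterns.filter
      (fun t => PySem.Str.isIn t.1
        (if t.2.1 then PySem.Str.lower ((PySem.Dict.mk f).getD "name" "") else (PySem.Dict.mk f).getD "name" ""))).map
      (fun t => t.2.2)) =
    (((pvFlat 0 pvGroups).filter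
      (fun t => (fun p : String × Bool => PySem.Str.isIn p.1
        (if p.2 then PySem.Str.lower ((PySem.Dict.mk f).getD "name" "") else (PySem.Dict.mk f).getD "name" "")) (t.1, t.2.1))).map
      (fun t => t.2.2)) from by rw [pvPatterns_eq_flat]]
  rw [pvMin_flat (fun p : String × Bool => PySem.Str.isIn p.1
      (if p.2 then PySem.Str.lower ((PySem.Dict.mk f).getD "name" "") else (PySem.Dict.mk f).getD "name" "")) pvGroups 0]
  rw [← pvRuleFind_chain ((PySem.Dict.mk f).getD "name" "")]
  cases pvRuleFind (fun p => PySem.Str.isIn p.1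
      (if p.2 then PySem.Str.lower ((PySem.Dict.mk f).getD "name" "") else (PySem.Dict.mk f).getD "name" "")) 0 pvGroups with
  | none => rfl
  | some i => rfl

-- distribute 'acc ++ ·.toList' over the if-chain of pvOpt
lemma pvApp_ite (acc : List String) (c : Prop) [Decidable c] (a : String) (o : Option String) :
    acc ++ (if c then some a else o).toList = if c then acc ++ [a] else acc ++ o.toList := by
  split <;> rfl

lemma pvAStep_opt (acc : List String) (f : List (String × String)) :
    pvAStep acc f = acc ++ (pvOpt ((PySem.Dict.mk f).getD "name" "")).toList := by
  simp only [pvOpt, pvApp_ite, Option.toList_none, List.append_nil]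
  simp only [pvAStep]

lemma pvDedup_snoc {α : Type} [DecidableEq α] (xs : List α) (a : α) :
    PySem.List.dedup (xs ++ [a]) =
      if a ∈ PySem.List.dedup xs then PySem.List.dedup xs else PySem.List.dedup xs ++ [a] := by
  simp only [PySem.List.dedup_eq_ofList, PySem.Set.ofList_eq_foldl, List.foldl_append,
    List.foldl_cons, List.foldl_nil]
  rw [PySem.Set.add]
  by_cases h : a ∈ (xs.foldl PySem.Set.add [] : List α)
  · simp [PySem.Set.contains, h]
  · simp [PySem.Set.contains, h]

lemma pvFold_eq (l : List (List (String × String))) (acc : List String) :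
    l.foldl pvBStep (PySem.List.dedup acc) = PySem.List.dedup (l.foldl pvAStep acc) := by
  induction l generalizing acc with
  | nil => rfl
  | cons f fs ih =>
    simp only [List.foldl_cons]
    rw [← ih (pvAStep acc f)]
    congr 1
    rw [pvBStep_opt, pvAStep_opt]
    cases pvOpt ((PySem.Dict.mk f).getD "name" "") with
    | none => simp [pvAdd]
    | some a =>
      dsimp only [Option.toList, pvAdd]
      rw [pvDedup_snoc]

lemma pvDedup_eq_nil_iff {α : Type} [DecidableEq α] (xs : List α) :
    PySem.List.dedup xs = [] ↔ xs = [] := by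
  constructor
  · intro h
    cases xs with
    | nil => rfl
    | cons x t =>
      have hx : x ∈ PySem.List.dedup (x :: t) := by simp
      rw [h] at hx; exact absurd hx (List.not_mem_nil)
  · intro h; subst h; rfl

-- ===== VERDICT =====
theorem map_sensors_to_actions_py_spec : Claim_equal_map_sensors_to_actions_py := by
  intro tf _ _
  unfold Spec_map_sensors_to_actions_py map_sensors_to_actions_py map_sensors_to_actions_py_alt
  have hfold := pvFold_eq (PySem.List.slice tf none (some 3)) []
  simp only [show PySem.List.dedup ([] : List String) = [] from rfl] at hfold
  rw [hfold]
  dsimp only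
  by_cases h : (PySem.List.slice tf none (some 3)).foldl pvAStep [] = []
  · simp only [h, if_pos, show PySem.List.dedup ([] : List String) = [] from rfl]
    rfl
  · have h' : PySem.List.dedup ((PySem.List.slice tf none (some 3)).foldl pvAStep []) ≠ [] := by
      intro hc; exact h ((pvDedup_eq_nil_iff _).mp hc)
    rw [if_neg h, if_neg h']
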